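-- pv_equiv track=rewrite | github.com/iprateekyadav1/captain-raccoon | captain_raccoon/engines/scene_engine.py | _action_to_motion
-- ===== SOURCE A (Python) =====
-- def _action_to_motion(action: str) -> str:
--     """Convert a static action description to motion language."""
--     action_lower = action.lower()
--     if any(w in action_lower for w in ["walk", "run", "mov"]):
--         return f"Character walks forward naturally, {action}"
--     if any(w in action_lower for w in ["sit", "rest", "lean"]):
--         return f"Character breathes gently, subtle idle sway, {action}"
--     if any(w in action_lower for w in ["look", "gaze", "star"]):
--         return f"Character's eyes move naturally, head tilts slightly, {action}"
--     if any(w in action_lower for w in ["speak", "talk", "say"]):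
--         return f"Character gestures naturally while speaking, expressive, {action}"
--     return f"Subtle natural movement, {action}"
-- ===== SOURCE B (Python) =====
-- _KEYWORD_GROUP = {
--     "walk": 0, "run": 0, "mov": 0,
--     "sit": 1, "rest": 1, "lean": 1,
--     "look": 2, "gaze": 2, "star": 2,
--     "speak": 3, "talk": 3, "say": 3,
-- }
--
-- _PREFIXES = [
--     "Character walks forward naturally",
--     "Character breathes gently, subtle idle sway",
--     "Character's eyes move naturally, head tilts slightly",
--     "Character gestures naturally while speaking, expressive",
--     "Subtle natural movement",
-- ]
--
--
-- def _action_to_motion(action: str) -> str: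
--     """Convert a static action description to motion language."""
--     s = action.lower()
--     best = len(_PREFIXES) - 1
--     for i in range(len(s)):
--         for kw, g in _KEYWORD_GROUP.items():
--             if g < best and s.startswith(kw, i):
--                 best = g
--     return f"{_PREFIXES[best]}, {action}"
-- ===== Notes on version B (the rewrite author's own statement) =====
-- stated objective: alternative
-- what changed: Replaced the four sequential any(keyword in s) branches by a single left-to-right scan of the lowered string that tests at each position which keywords start there and keeps the minimum group index, looking the prefix up at the end; it trades the C-speed substring searches for an explicit positional scan of the same asymptotic cost.
import Mathlib
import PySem

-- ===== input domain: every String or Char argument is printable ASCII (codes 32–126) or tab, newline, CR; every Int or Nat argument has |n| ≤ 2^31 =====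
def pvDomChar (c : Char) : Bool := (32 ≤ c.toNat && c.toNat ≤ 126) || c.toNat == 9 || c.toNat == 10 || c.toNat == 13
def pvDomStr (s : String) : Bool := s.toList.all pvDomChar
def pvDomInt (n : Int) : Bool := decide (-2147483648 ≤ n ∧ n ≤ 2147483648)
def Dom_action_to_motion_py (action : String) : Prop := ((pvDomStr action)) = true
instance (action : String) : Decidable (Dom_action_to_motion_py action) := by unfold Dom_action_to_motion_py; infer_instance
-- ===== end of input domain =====

-- B replaces A's four substring-membership branches by a single left-to-right scan of the
-- lowered string that computes the minimum-priority keyword group matching at any position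
-- (a different algorithm: positional startswith scan with a min accumulator, no 'in' tests).

-- ===== PORT A =====
def action_to_motion_py (action : String) : String :=
  let action_lower := PySem.Str.lower action
  if ["walk", "run", "mov"].any (fun w => PySem.Str.isIn w action_lower) then
    "Character walks forward naturally, " ++ action
  else if ["sit", "rest", "lean"].any (fun w => PySem.Str.isIn w action_lower) then
    "Character breathes gently, subtle idle sway, " ++ action
  else if ["look", "gaze", "star"].any (fun w => PySem.Str.isIn w action_lower) then
    "Character's eyes move naturally, head tilts slightly, " ++ action
  else if ["speak", "talk", "say"].any (fun w => PySem.Str.isIn w action_lower) then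
    "Character gestures naturally while speaking, expressive, " ++ action
  else
    "Subtle natural movement, " ++ action

-- ===== PORT B =====
-- _KEYWORD_GROUP: dict str -> int, iterated in insertion order (association list, per convention)
def pvKwGroups : List (List Char × Nat) :=
  [("walk".toList, 0), ("run".toList, 0), ("mov".toList, 0),
   ("sit".toList, 1), ("rest".toList, 1), ("lean".toList, 1),
   ("look".toList, 2), ("gaze".toList, 2), ("star".toList, 2),
   ("speak".toList, 3), ("talk".toList, 3), ("say".toList, 3)]

-- _PREFIXES
def pvPrefixes : List String :=
  ["Character walks forward naturally",
   "Character breathes gently, subtle idle sway",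
   "Character's eyes move naturally, head tilts slightly",
   "Character gestures naturally while speaking, expressive",
   "Subtle natural movement"]

-- Python's s.startswith(kw, i) for 0 ≤ i is exactly: kw is a prefix of s[i:], i.e.
-- PySem.Chars.startswith (cs.drop i) kw on the code-point list cs.
def action_to_motion_py_alt (action : String) : String :=
  let cs := (PySem.Str.lower action).toList
  let best := (PySem.List.pyRange 0 cs.length 1).foldl
    (fun b i => pvKwGroups.foldl
      (fun b p => if p.2 < b && PySem.Chars.startswith (cs.drop i.toNat) p.1 then p.2 else b) b)
    (pvPrefixes.length - 1)
  (pvPrefixes.getD best "") ++ ", " ++ action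

-- ===== PRECONDITION & SPEC =====
def Spec_action_to_motion_py (action : String) (out : String) : Prop := out = action_to_motion_py_alt action
instance (action : String) (out : String) : Decidable (Spec_action_to_motion_py action out) := by unfold Spec_action_to_motion_py; infer_instance

-- ===== CLAIM (what is proved, stated in full; the proofs are below) =====
def Claim_equal_action_to_motion_py : Prop := ∀ (action : String), Dom_action_to_motion_py action → Spec_action_to_motion_py action (action_to_motion_py action)

-- ===== LEMMAS AND PROOFS =====

-- group g has a keyword occurring in cs
def pvMatched (cs : List Char) (g : Nat) : Bool :=
  pvKwGroups.any (fun p => p.2 == g && PySem.Chars.isIn p.1 cs)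

-- generic facts about a never-increasing foldl accumulator
theorem pvFoldLe {α : Type} (f : Nat → α → Nat) (h : ∀ b x, f b x ≤ b) :
    ∀ (L : List α) (b : Nat), L.foldl f b ≤ b := by
  intro L
  induction L with
  | nil => intro b; simp
  | cons x xs ih => intro b; exact le_trans (ih (f b x)) (h b x)

theorem pvFoldReach {α : Type} (f : Nat → α → Nat) (Q : α → Nat → Prop)
    (h : ∀ b x, f b x = b ∨ Q x (f b x)) :
    ∀ (L : List α) (b : Nat), L.foldl f b = b ∨ ∃ x ∈ L, Q x (L.foldl f b) := by
  intro L
  induction L with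
  | nil => intro b; exact Or.inl rfl
  | cons x xs ih =>
    intro b
    rcases ih (f b x) with hrest | ⟨y, hy, hQ⟩
    · rcases h b x with he | hq
      · exact Or.inl (by simpa [List.foldl_cons, he] using hrest)
      · exact Or.inr ⟨x, List.mem_cons_self, by simpa [List.foldl_cons, hrest] using hq⟩
    · exact Or.inr ⟨y, List.mem_cons_of_mem _ hy, hQ⟩

theorem pvFoldHit {α : Type} (f : Nat → α → Nat) (h : ∀ b x, f b x ≤ b)
    (x : α) (B : Nat) (hx : ∀ b, f b x ≤ B) :
    ∀ (L : List α) (b : Nat), x ∈ L → L.foldl f b ≤ B := by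
  intro L
  induction L with
  | nil => intro b hm; simp at hm
  | cons y ys ih =>
    intro b hm
    rcases List.mem_cons.1 hm with he | hmem
    · subst he; exact le_trans (pvFoldLe f h ys (f b x)) (hx b)
    · exact ih (f b y) hmem

-- a nonempty keyword occurs in cs iff it starts at some scanned position
theorem pvExistsPos (cs kw : List Char) (hk : kw ≠ []) :
    (∃ i ∈ PySem.List.pyRange 0 (cs.length : Int) 1,
        PySem.Chars.startswith (cs.drop i.toNat) kw = true)
      ↔ PySem.Chars.isIn kw cs = true := by
  constructor
  · rintro ⟨i, _, hpre⟩
    rw [← PySem.Chars.exists_prefix_drop_iff_isIn]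
    exact ⟨i.toNat, (PySem.Chars.startswith_iff _ _).1 hpre⟩
  · intro hin
    obtain ⟨j, hj⟩ := (PySem.Chars.exists_prefix_drop_iff_isIn kw cs).2 hin
    have hjlt : j < cs.length := by
      by_contra hge
      rw [List.drop_eq_nil_of_le (Nat.le_of_not_lt hge)] at hj
      exact hk (List.prefix_nil.mp hj)
    refine ⟨(j : Int), ?_, ?_⟩
    · rw [PySem.List.mem_pyRange_one]; exact ⟨by positivity, by exact_mod_cast hjlt⟩
    · simpa using (PySem.Chars.startswith_iff _ _).2 hj

-- every table entry has a nonempty keyword and a group index below 4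
theorem pvTable_facts : ∀ p ∈ pvKwGroups, p.1 ≠ [] ∧ p.2 < 4 := by decide

-- the scan computes the first (minimum) matching group, default 4
theorem pvBest_eq (cs : List Char) :
    (PySem.List.pyRange 0 (cs.length : Int) 1).foldl
      (fun b i => pvKwGroups.foldl
        (fun b p => if p.2 < b && PySem.Chars.startswith (cs.drop i.toNat) p.1 then p.2 else b) b)
      (pvPrefixes.length - 1)
    = if pvMatched cs 0 then 0 else if pvMatched cs 1 then 1
      else if pvMatched cs 2 then 2 else if pvMatched cs 3 then 3 else 4 := by
  -- generalize the keyword table so the unifier never evaluates the folds on the literal list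
  generalize hT : pvKwGroups = T
  set F : Nat → Int → Nat := fun b i => T.foldl
      (fun b p => if p.2 < b && PySem.Chars.startswith (cs.drop i.toNat) p.1 then p.2 else b) b
    with hF
  have hinner_le : ∀ (i : Int) (b : Nat) (p : List Char × Nat),
      (if p.2 < b && PySem.Chars.startswith (cs.drop i.toNat) p.1 then p.2 else b) ≤ b := by
    intro i b p
    split_ifs with h
    · simp only [Bool.and_eq_true, decide_eq_true_eq] at h; omega
    · exact le_refl b
  have hF_le : ∀ b i, F b i ≤ b := fun b i => pvFoldLe _ (hinner_le i) T b
  have hF_reach : ∀ b i, F b i = b ∨ ∃ p ∈ T,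
      (PySem.Chars.startswith (cs.drop i.toNat) p.1 = true ∧ F b i = p.2) := by
    intro b i
    exact pvFoldReach
      (fun b p => if p.2 < b && PySem.Chars.startswith (cs.drop i.toNat) p.1 then p.2 else b)
      (fun p r => PySem.Chars.startswith (cs.drop i.toNat) p.1 = true ∧ r = p.2)
      (by
        intro b p
        dsimp only
        split_ifs with h
        · simp only [Bool.and_eq_true, decide_eq_true_eq] at h
          exact Or.inr ⟨h.2, rfl⟩
        · exact Or.inl rfl) T b
  have hF_hit : ∀ (p : List Char × Nat), p ∈ T → ∀ (i : Int),
      PySem.Chars.startswith (cs.drop i.toNat) p.1 = true → ∀ b, F b i ≤ p.2 := by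
    intro p hp i hst b
    refine pvFoldHit _ (hinner_le i) p p.2 ?_ T b hp
    intro b'
    dsimp only
    split_ifs with h
    · exact le_refl _
    · simp only [Bool.and_eq_true, decide_eq_true_eq, hst, and_true, not_lt] at h
      exact h
  set R := PySem.List.pyRange 0 (cs.length : Int) 1 with hR
  set best := R.foldl F (pvPrefixes.length - 1) with hbest
  have h4 : best ≤ 4 := by
    have := pvFoldLe F hF_le R (pvPrefixes.length - 1)
    simpa [pvPrefixes] using this
  have hreach : best = pvPrefixes.length - 1 ∨ ∃ i ∈ R, ∃ p ∈ T,
      PySem.Chars.startswith (cs.drop i.toNat) p.1 = true ∧ best = p.2 :=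
    pvFoldReach F
      (fun i r => ∃ p ∈ T, PySem.Chars.startswith (cs.drop i.toNat) p.1 = true ∧ r = p.2)
      (by
        intro b i
        rcases hF_reach b i with he | ⟨p, hp, hst, hv⟩
        · exact Or.inl he
        · exact Or.inr ⟨p, hp, hst, hv⟩) R (pvPrefixes.length - 1)
  have hhit : ∀ (p : List Char × Nat), p ∈ T →
      PySem.Chars.isIn p.1 cs = true → best ≤ p.2 := by
    intro p hp hin
    obtain ⟨i, hiR, hst⟩ := (pvExistsPos cs p.1 (pvTable_facts p (hT ▸ hp)).1).2 hin
    exact pvFoldHit F hF_le i p.2 (fun b => hF_hit p hp i hst b) R _ hiR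
  -- if group g is matched, best ≤ g
  have hle : ∀ g : Nat, pvMatched cs g = true → best ≤ g := by
    intro g hm
    simp only [pvMatched, List.any_eq_true, Bool.and_eq_true, beq_iff_eq] at hm
    obtain ⟨p, hp, hg, hin⟩ := hm
    exact hg ▸ hhit p (hT ▸ hp) hin
  have hkey : best < 4 → pvMatched cs best = true := by
    intro hblt
    rcases hreach with h4' | ⟨i, hiR, p, hp, hst, hv⟩
    · rw [h4'] at hblt; simp [pvPrefixes] at hblt
    · have hin : PySem.Chars.isIn p.1 cs = true :=
        (pvExistsPos cs p.1 (pvTable_facts p (hT ▸ hp)).1).1 ⟨i, hiR, hst⟩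
      rw [hv]
      simp only [pvMatched, List.any_eq_true, Bool.and_eq_true, beq_iff_eq]
      exact ⟨p, hT ▸ hp, rfl, hin⟩
  have hnone : best = 4 → ∀ g : Nat, g < 4 → pvMatched cs g = false := by
    intro hb g hg
    by_contra h
    have := hle g (by simpa using h)
    omega
  clear_value best
  clear hbest hreach hF_le hF_reach hF_hit hinner_le hhit hF hR
  interval_cases best
  · have h0 := hkey (by omega)
    simp [h0]
  · have h1 := hkey (by omega)
    have h0 : pvMatched cs 0 = false := by
      by_contra h; have := hle 0 (by simpa using h); omega
    simp [h0, h1]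
  · have h2 := hkey (by omega)
    have h0 : pvMatched cs 0 = false := by
      by_contra h; have := hle 0 (by simpa using h); omega
    have h1 : pvMatched cs 1 = false := by
      by_contra h; have := hle 1 (by simpa using h); omega
    simp [h0, h1, h2]
  · have h3 := hkey (by omega)
    have h0 : pvMatched cs 0 = false := by
      by_contra h; have := hle 0 (by simpa using h); omega
    have h1 : pvMatched cs 1 = false := by
      by_contra h; have := hle 1 (by simpa using h); omega
    have h2 : pvMatched cs 2 = false := by
      by_contra h; have := hle 2 (by simpa using h); omega
    simp [h0, h1, h2, h3]
  · have hno := hnone rfl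
    simp [hno 0 (by omega), hno 1 (by omega), hno 2 (by omega), hno 3 (by omega)]

-- ===== VERDICT (by name: the statement is the Claim_ definition above) =====
theorem action_to_motion_py_spec : Claim_equal_action_to_motion_py := by
  intro action _
  show action_to_motion_py action = action_to_motion_py_alt action
  simp only [action_to_motion_py, action_to_motion_py_alt]
  rw [pvBest_eq ((PySem.Str.lower action).toList)]
  simp [pvMatched, pvKwGroups, pvPrefixes, PySem.Str.isIn_eq]
  split_ifs <;> rfl
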